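-- pv_equiv track=rewrite | github.com/jasmine2000/ri-bio-project | patent_parser/input.py | parse_for_keywords
-- ===== SOURCE A (Python) =====
-- def parse_for_keywords(line, keywords):
--     '''
--     Used during main loop of parse_doc to find key terms such as 'CPC'
--     Short algorithm that iterates over line once, keeping track of consecutive matching letters
--
--     example input:
--         "(75)  Inventors:  Thomas J. Webster, Barrington, RI"
--     output:
--         "Inventors"
--
--     '''
--     counter = {keyword: 0 for keyword in keywords}
--     i = 0
--     while i < len(line):
--         char = line[i]
--         for key, val in counter.items():
--             if val == len(key): # have found a match for all letters
--                 return key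
--             elif key[val] == char: # if the next letter matches, add to count/index
--                 counter[key] += 1
--             else:
--                 counter[key] = 0 # letter doesn't match, reset counter
--
--         i += 1
--
--     return None
-- ===== SOURCE B (Python) =====
-- def match_end(line, key):
--     """Smallest number of leading characters of line after which key has just been
--     matched as a run of consecutive characters; the run counter resets to zero on a
--     mismatch (no backtracking). None if key never completes; an empty key needs 0."""
--     if not key:
--         return 0
--     matched = 0
--     for i, ch in enumerate(line):
--         if ch == key[matched]:
--             matched += 1
--             if matched == len(key):
--                 return i + 1
--         else:
--             matched = 0
--     return None
--
--
-- def parse_for_keywords(line, keywords):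
--     """Keyword-major scan: compute each keyword's completion point independently and
--     return the keyword that completes earliest, ties going to the first one listed.
--     Only the prefix that could still beat the current best needs scanning."""
--     best = None  # (completion point, keyword)
--     for key in keywords:
--         scope = line if best is None else line[:best[0]]
--         end = match_end(scope, key)
--         if end is not None and (best is None or end < best[0]):
--             best = (end, key)
--     return best[1] if best is not None else None
-- ===== Notes on version B (the rewrite author's own statement) =====
-- stated objective: alternative
-- what changed: Replaces A's char-major while-loop over a mutable per-keyword counter dict (returning mid-scan) with an independent completion-point scan per keyword followed by an argmin selection with first-listed tie-breaking.
-- intended difference: On inputs where some keyword's consecutive-match scan first completes exactly at the end of the line and no keyword completes earlier, A returns None (it only reports a completed match when a later character is processed, so a keyword ending the line is never found), while B returns that keyword, which is the intended result. — e.g. on parse_for_keywords("ab", ["ab"]): A returns none, B returns some "ab"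
import Mathlib
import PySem

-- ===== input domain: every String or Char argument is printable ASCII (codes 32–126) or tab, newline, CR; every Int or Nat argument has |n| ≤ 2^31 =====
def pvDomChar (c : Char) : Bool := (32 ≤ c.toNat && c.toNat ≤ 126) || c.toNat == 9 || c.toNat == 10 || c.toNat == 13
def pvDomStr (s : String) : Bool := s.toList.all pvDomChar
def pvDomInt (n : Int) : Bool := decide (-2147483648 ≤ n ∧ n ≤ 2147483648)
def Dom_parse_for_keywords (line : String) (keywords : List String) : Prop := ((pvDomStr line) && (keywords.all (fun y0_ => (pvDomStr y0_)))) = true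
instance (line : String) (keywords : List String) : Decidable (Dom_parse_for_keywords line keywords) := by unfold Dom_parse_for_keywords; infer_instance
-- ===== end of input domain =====

-- B computes each keyword's consecutive-match completion point independently and selects the
-- earliest (keyword-major argmin) instead of A's char-major loop over a mutable counter dict;
-- where a keyword first completes exactly at the end of the line (and none earlier), A misses
-- it and returns none while B returns it (stated as the intended difference D_ below).


-- ===== PORT A =====
-- The counter dict's state is carried as its items list (keys fixed, values updated in
-- place, order preserved — exactly Python's iteration over counter.items() with
-- counter[key] reassignment).  key[val] is read only after `val == len(key)` was checked,
-- and values stay within 0..len(key), so the `else 0` arm behind pyGet? is unreachable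
-- (Python never raises here).
def pvStepA (ch : Char) : List (String × Int) → Sum String (List (String × Int))
  | [] => Sum.inr []
  | (k, v) :: rest =>
    if v = PySem.Str.len k then Sum.inl k
    else
      let v' : Int := if PySem.Str.pyGet? k v = some ch then v + 1 else 0
      match pvStepA ch rest with
      | Sum.inl r => Sum.inl r
      | Sum.inr es => Sum.inr ((k, v') :: es)

def pvLoopA : List Char → List (String × Int) → Option String
  | [], _ => none
  | ch :: rest, es =>
    match pvStepA ch es with
    | Sum.inl k => some k
    | Sum.inr es' => pvLoopA rest es'

def parse_for_keywords (line : String) (keywords : List String) : Option String :=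
  pvLoopA line.toList
    ((keywords.foldl (fun d k => d.insert k (0 : Int)) PySem.Dict.empty).items)

-- ===== PORT B =====
-- match_end: run counter over the line, reset to 0 on mismatch; returns the number of
-- leading chars consumed when the keyword has just been matched (0 for the empty keyword)
def pvMatchEndGo (key : String) : Int → Nat → List Char → Option Nat
  | _, _, [] => none
  | matched, i, ch :: rest =>
    if PySem.Str.pyGet? key matched = some ch then
      if matched + 1 = PySem.Str.len key then some (i + 1)
      else pvMatchEndGo key (matched + 1) (i + 1) rest
    else pvMatchEndGo key 0 (i + 1) rest

def pvMatchEnd (key : String) (cs : List Char) : Option Nat :=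
  if PySem.Str.len key = 0 then some 0
  else pvMatchEndGo key 0 0 cs

-- loop body of B's argmin over the keywords (first-listed wins ties via strict <);
-- `scope` is line[:best[0]]: only the prefix that could still beat the best is scanned
def pvUpdB (cs : List Char) (best : Option (Nat × String)) (key : String) :
    Option (Nat × String) :=
  let scope := match best with | none => cs | some (be, _) => cs.take be
  match pvMatchEnd key scope with
  | none => best
  | some e =>
    match best with
    | none => some (e, key)
    | some (be, _) => if e < be then some (e, key) else best

def parse_for_keywords_alt (line : String) (keywords : List String) : Option String :=
  (keywords.foldl (pvUpdB line.toList) none).map (·.2)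

-- ===== PRECONDITION & SPEC =====
-- sticky run-counter state of the reset-on-mismatch scan for keyword k, used only to state D_
def pvStepD (k : String) (s : Int) (c : Char) : Int :=
  if s = PySem.Str.len k then s
  else if PySem.Str.pyGet? k s = some c then s + 1 else 0

def pvDoneD (k : String) (cs : List Char) : Bool :=
  cs.foldl (pvStepD k) 0 == PySem.Str.len k

-- On inputs where some keyword's consecutive-match scan first completes exactly at the end of
-- the line and no keyword completes earlier, A returns none (it reports a completed match only
-- when a later character is processed, so a keyword ending the line is never found) while B
-- returns that keyword, the intended result.
def D_parse_for_keywords (line : String) (keywords : List String) : Prop :=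
  (∃ k ∈ keywords, pvDoneD k line.toList = true) ∧
  (∀ k ∈ keywords, ∀ j < line.toList.length, pvDoneD k (line.toList.take j) = false)

instance (line : String) (keywords : List String) : Decidable (D_parse_for_keywords line keywords) := by
  unfold D_parse_for_keywords; infer_instance

def Spec_parse_for_keywords (line : String) (keywords : List String) (out : Option String) : Prop := ¬ D_parse_for_keywords line keywords → out = parse_for_keywords_alt line keywords
instance (line : String) (keywords : List String) (out : Option String) : Decidable (Spec_parse_for_keywords line keywords out) := by unfold Spec_parse_for_keywords; infer_instance

def pvDiffWitness_parse_for_keywords : String × List String := ("ab", ["ab"])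
def pvDiffWitnessOut_parse_for_keywords : (Option String) × (Option String) := (none, some "ab")

-- ===== CLAIM (what is proved, stated in full; the proofs are below) =====
def Claim_unchanged_parse_for_keywords : Prop := ∀ (line : String) (keywords : List String), Dom_parse_for_keywords line keywords → Spec_parse_for_keywords line keywords (parse_for_keywords line keywords)
def Claim_changed_parse_for_keywords : Prop := Dom_parse_for_keywords (pvDiffWitness_parse_for_keywords.1) (pvDiffWitness_parse_for_keywords.2) ∧ D_parse_for_keywords (pvDiffWitness_parse_for_keywords.1) (pvDiffWitness_parse_for_keywords.2) ∧ parse_for_keywords (pvDiffWitness_parse_for_keywords.1) (pvDiffWitness_parse_for_keywords.2) = pvDiffWitnessOut_parse_for_keywords.1 ∧ parse_for_keywords_alt (pvDiffWitness_parse_for_keywords.1) (pvDiffWitness_parse_for_keywords.2) = pvDiffWitnessOut_parse_for_keywords.2 ∧ pvDiffWitnessOut_parse_for_keywords.1 ≠ pvDiffWitnessOut_parse_for_keywords.2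
def Claim_exact_parse_for_keywords : Prop := ∀ (line : String) (keywords : List String), Dom_parse_for_keywords line keywords → D_parse_for_keywords line keywords → parse_for_keywords line keywords ≠ parse_for_keywords_alt line keywords

-- ===== LEMMAS AND PROOFS =====

/-- Number of chars of `cs` consumed until the counter, started at `v`, first
reaches `len k` under A's reset-on-mismatch step (`some 0` if already there). -/
def pvRc (k : String) : Int → List Char → Option Nat
  | v, [] => if v = PySem.Str.len k then some 0 else none
  | v, ch :: t =>
    if v = PySem.Str.len k then some 0
    else (pvRc k (if PySem.Str.pyGet? k v = some ch then v + 1 else 0) t).map (· + 1)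

/-- A's selection step: an entry qualifies iff its completion consumes fewer chars than
`cs` has; strict improvement keeps the earliest entry on ties. -/
def pvSelUpd (cs : List Char) (best : Option (Nat × String)) (p : String × Int) :
    Option (Nat × String) :=
  match pvRc p.1 p.2 cs with
  | none => best
  | some r =>
    if r < cs.length then
      match best with
      | none => some (r, p.1)
      | some (br, _) => if r < br then some (r, p.1) else best
    else best

def pvSel (cs : List Char) (es : List (String × Int)) : Option String :=
  (es.foldl (pvSelUpd cs) none).map (·.2)

def pvShift : Option (Nat × String) → Option (Nat × String) :=
  Option.map (fun p => (p.1 + 1, p.2))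

def pvStepEntry (ch : Char) (p : String × Int) : String × Int :=
  (p.1, if PySem.Str.pyGet? p.1 p.2 = some ch then p.2 + 1 else 0)

lemma pvSelUpd_none (cs : List Char) (best : Option (Nat × String)) (p : String × Int)
    (h : pvRc p.1 p.2 cs = none) : pvSelUpd cs best p = best := by
  simp only [pvSelUpd, h]

lemma pvSelUpd_some (cs : List Char) (best : Option (Nat × String)) (p : String × Int)
    (r : Nat) (h : pvRc p.1 p.2 cs = some r) :
    pvSelUpd cs best p =
      if r < cs.length then
        match best with
        | none => some (r, p.1)
        | some (br, _) => if r < br then some (r, p.1) else best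
      else best := by
  simp only [pvSelUpd, h]

lemma pvSelUpd_nil (best : Option (Nat × String)) (p : String × Int) :
    pvSelUpd [] best p = best := by
  cases h : pvRc p.1 p.2 [] with
  | none => exact pvSelUpd_none _ _ _ h
  | some r =>
    rw [pvSelUpd_some _ _ _ r h, if_neg (by simp)]

lemma pvFoldl_selUpd_nil (es : List (String × Int)) (best : Option (Nat × String)) :
    List.foldl (pvSelUpd []) best es = best := by
  induction es generalizing best with
  | nil => rfl
  | cons p es ih => rw [List.foldl_cons, pvSelUpd_nil, ih]

lemma pvSelUpd_keep0 (cs : List Char) (s : String) (p : String × Int) :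
    pvSelUpd cs (some (0, s)) p = some (0, s) := by
  cases h : pvRc p.1 p.2 cs with
  | none => exact pvSelUpd_none _ _ _ h
  | some r =>
    rw [pvSelUpd_some _ _ _ r h]
    by_cases hlt : r < cs.length
    · rw [if_pos hlt]
      show (if r < 0 then _ else _) = _
      rw [if_neg (by omega)]
    · rw [if_neg hlt]

lemma pvFoldl_keep0 (cs : List Char) (es : List (String × Int)) (s : String) :
    List.foldl (pvSelUpd cs) (some (0, s)) es = some (0, s) := by
  induction es with
  | nil => rfl
  | cons p es ih => rw [List.foldl_cons, pvSelUpd_keep0, ih]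

lemma pvStepA_inr (ch : Char) :
    ∀ (es es' : List (String × Int)), pvStepA ch es = Sum.inr es' →
      es' = es.map (pvStepEntry ch) ∧ ∀ p ∈ es, p.2 ≠ PySem.Str.len p.1 := by
  intro es
  induction es with
  | nil =>
    intro es' h
    simp only [pvStepA] at h
    injection h with h
    subst h
    simp
  | cons p rest ih =>
    intro es' h
    obtain ⟨k, v⟩ := p
    by_cases hv : v = PySem.Str.len k
    · simp only [pvStepA, if_pos hv] at h
      simp at h
    · simp only [pvStepA, if_neg hv] at h
      cases hrec : pvStepA ch rest with
      | inl r => rw [hrec] at h; simp at h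
      | inr es'' =>
        rw [hrec] at h
        injection h with h
        obtain ⟨h1, h2⟩ := ih es'' hrec
        subst h1
        constructor
        · rw [← h, List.map_cons]; rfl
        · intro q hq
          rcases List.mem_cons.mp hq with hq | hq
          · subst hq; exact hv
          · exact h2 q hq

lemma pvFoldA_found (ch : Char) (t : List Char) :
    ∀ (es : List (String × Int)) (best : Option (Nat × String)) (k : String),
      pvStepA ch es = Sum.inl k →
      (best = none ∨ ∃ br s, best = some (br, s) ∧ 1 ≤ br) →
      List.foldl (pvSelUpd (ch :: t)) best es = some (0, k) := by
  intro es
  induction es with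
  | nil => intro best k h _; simp [pvStepA] at h
  | cons p rest ih =>
    intro best k h hbest
    obtain ⟨k0, v0⟩ := p
    by_cases hv : v0 = PySem.Str.len k0
    · simp only [pvStepA, if_pos hv] at h
      have hk : k0 = k := by injection h
      have hrc : pvRc k0 v0 (ch :: t) = some 0 := by
        simp only [pvRc]; rw [if_pos hv]
      have hupd : pvSelUpd (ch :: t) best (k0, v0) = some (0, k0) := by
        rw [pvSelUpd_some _ _ _ 0 hrc, if_pos (by simp : (0:Nat) < (ch :: t).length)]
        rcases hbest with h1 | ⟨br, s, h1, h2⟩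
        · subst h1; rfl
        · subst h1
          show (if 0 < br then _ else _) = _
          rw [if_pos (by omega)]
      rw [List.foldl_cons, hupd, pvFoldl_keep0, hk]
    · simp only [pvStepA, if_neg hv] at h
      cases hrec : pvStepA ch rest with
      | inr es'' => rw [hrec] at h; simp at h
      | inl r =>
        rw [hrec] at h
        injection h with h
        subst h
        rw [List.foldl_cons]
        apply ih _ _ hrec
        have hrc : pvRc k0 v0 (ch :: t) =
            (pvRc k0 (if PySem.Str.pyGet? k0 v0 = some ch then v0 + 1 else 0) t).map (· + 1) := by
          simp only [pvRc]; rw [if_neg hv]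
        cases hr : pvRc k0 (if PySem.Str.pyGet? k0 v0 = some ch then v0 + 1 else 0) t with
        | none =>
          have h2 : pvRc k0 v0 (ch :: t) = none := by rw [hrc, hr]; rfl
          rw [pvSelUpd_none _ _ _ h2]
          exact hbest
        | some r' =>
          have h2 : pvRc k0 v0 (ch :: t) = some (r' + 1) := by rw [hrc, hr]; rfl
          rw [pvSelUpd_some _ _ _ (r' + 1) h2]
          by_cases hlt : r' + 1 < (ch :: t).length
          · rw [if_pos hlt]
            rcases hbest with h1 | ⟨br, s, h1, h2'⟩
            · subst h1; right; exact ⟨r' + 1, k0, rfl, by omega⟩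
            · subst h1
              by_cases hrb : r' + 1 < br
              · right
                refine ⟨r' + 1, k0, ?_, by omega⟩
                show (if r' + 1 < br then some (r' + 1, k0) else some (br, s)) = some (r' + 1, k0)
                rw [if_pos hrb]
              · right
                refine ⟨br, s, ?_, h2'⟩
                show (if r' + 1 < br then some (r' + 1, k0) else some (br, s)) = some (br, s)
                rw [if_neg hrb]
          · rw [if_neg hlt]; exact hbest

lemma pvSelUpd_cons (ch : Char) (t : List Char) (best : Option (Nat × String))
    (p : String × Int) (hp : p.2 ≠ PySem.Str.len p.1) :
    pvSelUpd (ch :: t) (pvShift best) p = pvShift (pvSelUpd t best (pvStepEntry ch p)) := by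
  obtain ⟨k, v⟩ := p
  have hrc : pvRc k v (ch :: t) =
      (pvRc k (if PySem.Str.pyGet? k v = some ch then v + 1 else 0) t).map (· + 1) := by
    simp only [pvRc]; rw [if_neg hp]
  cases hr : pvRc k (if PySem.Str.pyGet? k v = some ch then v + 1 else 0) t with
  | none =>
    have h1 : pvRc k v (ch :: t) = none := by rw [hrc, hr]; rfl
    rw [pvSelUpd_none _ _ _ h1, pvSelUpd_none _ _ _ hr]
  | some r =>
    have h1 : pvRc k v (ch :: t) = some (r + 1) := by rw [hrc, hr]; rfl
    rw [pvSelUpd_some _ _ _ (r + 1) h1, pvSelUpd_some _ _ _ r hr]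
    have hlen : (ch :: t).length = t.length + 1 := rfl
    by_cases hlt : r < t.length
    · have hlt' : r + 1 < (ch :: t).length := by rw [hlen]; omega
      rw [if_pos hlt, if_pos hlt']
      cases best with
      | none => rfl
      | some b =>
        obtain ⟨br, s⟩ := b
        show (if r + 1 < br + 1 then _ else _) = pvShift (if r < br then _ else _)
        by_cases hrb : r < br
        · rw [if_pos hrb, if_pos (by omega : r + 1 < br + 1)]; rfl
        · rw [if_neg hrb, if_neg (by omega : ¬ r + 1 < br + 1)]
    · have hlt' : ¬ (r + 1 < (ch :: t).length) := by rw [hlen]; omega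
      rw [if_neg hlt, if_neg hlt']

lemma pvFoldA_cont (ch : Char) (t : List Char) :
    ∀ (es : List (String × Int)) (best : Option (Nat × String)),
      (∀ p ∈ es, p.2 ≠ PySem.Str.len p.1) →
      List.foldl (pvSelUpd (ch :: t)) (pvShift best) es =
        pvShift (List.foldl (pvSelUpd t) best (es.map (pvStepEntry ch))) := by
  intro es
  induction es with
  | nil => intro best _; rfl
  | cons p rest ih =>
    intro best hall
    rw [List.map_cons, List.foldl_cons, List.foldl_cons,
      pvSelUpd_cons ch t best p (hall p (by simp))]
    exact ih _ (fun q hq => hall q (by simp [hq]))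

lemma pvLoopA_eq_sel : ∀ (cs : List Char) (es : List (String × Int)),
    pvLoopA cs es = pvSel cs es := by
  intro cs
  induction cs with
  | nil => intro es; simp [pvLoopA, pvSel, pvFoldl_selUpd_nil]
  | cons ch t ih =>
    intro es
    cases h : pvStepA ch es with
    | inl k =>
      have hfound := pvFoldA_found ch t es none k h (Or.inl rfl)
      simp [pvLoopA, h, pvSel, hfound]
    | inr es' =>
      obtain ⟨h1, h2⟩ := pvStepA_inr ch es es' h
      subst h1
      have hfold := pvFoldA_cont ch t es none h2
      simp only [pvShift, Option.map_none] at hfold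
      simp only [pvLoopA, h, ih, pvSel, hfold]
      cases List.foldl (pvSelUpd t) none (es.map (pvStepEntry ch)) <;> rfl

-- ===== dict initialisation: the dict keeps only the first occurrence of each keyword =====

def pvDdAfter : List String → List String → List String
  | _, [] => []
  | seen, k :: t => if k ∈ seen then pvDdAfter seen t else k :: pvDdAfter (seen ++ [k]) t

lemma pvItems_init :
    ∀ (l : List String) (d : PySem.Dict String Int) (seen : List String),
      d.items = seen.map (fun k => (k, (0 : Int))) →
      (l.foldl (fun d k => d.insert k (0 : Int)) d).items =
        (seen ++ pvDdAfter seen l).map (fun k => (k, (0 : Int))) := by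
  intro l
  induction l with
  | nil => intro d seen h; rw [pvDdAfter, List.append_nil]; exact h
  | cons k t ih =>
    intro d seen h
    have hkeys : d.keys = seen := by
      show d.items.map (·.1) = seen
      rw [h, List.map_map]
      exact List.map_id seen
    by_cases hk : k ∈ seen
    · have hc : d.contains k = true := (PySem.Dict.contains_iff_mem_keys d k).mpr (hkeys ▸ hk)
      have hitems : (d.insert k (0 : Int)).items = seen.map (fun k => (k, (0 : Int))) := by
        rw [PySem.Dict.items_insert_of_contains d (0 : Int) hc, h, List.map_map]
        apply List.map_congr_left
        intro x _
        by_cases hx : x = k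
        · subst hx; simp
        · simp [hx]
      rw [List.foldl_cons, ih _ seen hitems, pvDdAfter, if_pos hk]
    · have hc : d.contains k = false := by
        cases hcon : d.contains k
        · rfl
        · exact absurd (hkeys ▸ (PySem.Dict.contains_iff_mem_keys d k).mp hcon) hk
      have hitems : (d.insert k (0 : Int)).items =
          (seen ++ [k]).map (fun k => (k, (0 : Int))) := by
        rw [PySem.Dict.items_insert_of_not_contains d (0 : Int) hc, h]
        simp
      rw [List.foldl_cons, ih _ (seen ++ [k]) hitems, pvDdAfter, if_neg hk,
        List.append_assoc]
      rfl

lemma pvFoldl_add_eq_ddAfter :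
    ∀ (l seen : List String), List.foldl PySem.Set.add seen l = seen ++ pvDdAfter seen l := by
  intro l
  induction l with
  | nil => intro seen; rw [List.foldl_nil, pvDdAfter, List.append_nil]
  | cons k t ih =>
    intro seen
    by_cases hk : k ∈ seen
    · rw [List.foldl_cons, pvDdAfter, if_pos hk,
        show PySem.Set.add seen k = seen by simp [PySem.Set.add, hk], ih]
    · rw [List.foldl_cons, pvDdAfter, if_neg hk,
        show PySem.Set.add seen k = seen ++ [k] by simp [PySem.Set.add, hk], ih,
        List.append_assoc]
      rfl

lemma pvDd_eq_dedup (l : List String) : pvDdAfter [] l = PySem.List.dedup l := by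
  have := pvFoldl_add_eq_ddAfter l []
  rw [List.nil_append] at this
  exact this.symm

lemma pvMem_ddAfter : ∀ (l seen : List String) (k : String), k ∈ pvDdAfter seen l → k ∈ l := by
  intro l
  induction l with
  | nil => intro seen k h; exact absurd h (by simp [pvDdAfter])
  | cons a t ih =>
    intro seen k h
    rw [pvDdAfter] at h
    by_cases ha : a ∈ seen
    · rw [if_pos ha] at h; exact List.mem_cons_of_mem a (ih _ _ h)
    · rw [if_neg ha] at h
      rcases List.mem_cons.mp h with h | h
      · subst h; exact List.mem_cons_self
      · exact List.mem_cons_of_mem a (ih _ _ h)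

-- ===== B side: match_end computes pvRc =====

lemma pvRc_self (k : String) (v : Int) (cs : List Char) (hv : v = PySem.Str.len k) :
    pvRc k v cs = some 0 := by
  cases cs <;> (simp only [pvRc]; rw [if_pos hv])

lemma pvRc_le (k : String) : ∀ (cs : List Char) (v : Int) (e : Nat),
    pvRc k v cs = some e → e ≤ cs.length := by
  intro cs
  induction cs with
  | nil =>
    intro v e h
    simp only [pvRc] at h
    by_cases hv : v = PySem.Str.len k
    · rw [if_pos hv] at h; injection h with h; omega
    · rw [if_neg hv] at h; exact absurd h (by simp)
  | cons ch t ih =>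
    intro v e h
    simp only [pvRc] at h
    by_cases hv : v = PySem.Str.len k
    · rw [if_pos hv] at h; injection h with h; omega
    · rw [if_neg hv] at h
      cases hr : pvRc k (if PySem.Str.pyGet? k v = some ch then v + 1 else 0) t with
      | none => rw [hr] at h; exact absurd h (by simp)
      | some e' =>
        rw [hr] at h
        simp only [Option.map_some, Option.some.injEq] at h
        have := ih _ _ hr
        simp only [List.length_cons]
        omega

lemma pvMatchEndGo_eq (key : String) (hlen : PySem.Str.len key ≠ 0) :
    ∀ (cs : List Char) (v : Int) (i : Nat), v ≠ PySem.Str.len key →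
      pvMatchEndGo key v i cs = (pvRc key v cs).map (i + ·) := by
  intro cs
  induction cs with
  | nil =>
    intro v i hv
    simp only [pvMatchEndGo, pvRc]
    rw [if_neg hv]
    rfl
  | cons ch t ih =>
    intro v i hv
    simp only [pvMatchEndGo, pvRc]
    rw [if_neg hv]
    by_cases hm : PySem.Str.pyGet? key v = some ch
    · rw [if_pos hm, if_pos hm]
      by_cases hc : v + 1 = PySem.Str.len key
      · rw [if_pos hc, pvRc_self key (v + 1) t hc]
        simp
      · rw [if_neg hc, ih (v + 1) (i + 1) hc]
        cases pvRc key (v + 1) t with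
        | none => rfl
        | some m => simp only [Option.map_some, Option.some.injEq]; omega
    · rw [if_neg hm, if_neg hm, ih 0 (i + 1) (fun h => hlen h.symm)]
      cases pvRc key 0 t with
      | none => rfl
      | some m => simp only [Option.map_some, Option.some.injEq]; omega

lemma pvMatchEnd_eq (key : String) (cs : List Char) :
    pvMatchEnd key cs = pvRc key 0 cs := by
  unfold pvMatchEnd
  by_cases hl : PySem.Str.len key = 0
  · rw [if_pos hl, pvRc_self key 0 cs hl.symm]
  · rw [if_neg hl, pvMatchEndGo_eq key hl cs 0 0 (fun h => hl h.symm)]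
    cases pvRc key 0 cs with
    | none => rfl
    | some m => simp

/-- B's update step rewritten through pvRc. -/
def pvUpdU (cs : List Char) (best : Option (Nat × String)) (key : String) :
    Option (Nat × String) :=
  match pvRc key 0 cs with
  | none => best
  | some e =>
    match best with
    | none => some (e, key)
    | some (be, _) => if e < be then some (e, key) else best

lemma pvUpdU_none (cs : List Char) (b : Option (Nat × String)) (k : String)
    (h : pvRc k 0 cs = none) : pvUpdU cs b k = b := by
  simp only [pvUpdU, h]

lemma pvUpdU_some_none (cs : List Char) (k : String) (e : Nat)
    (h : pvRc k 0 cs = some e) : pvUpdU cs none k = some (e, k) := by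
  simp only [pvUpdU, h]

lemma pvUpdU_some_some (cs : List Char) (k : String) (e be : Nat) (s : String)
    (h : pvRc k 0 cs = some e) :
    pvUpdU cs (some (be, s)) k = if e < be then some (e, k) else some (be, s) := by
  simp only [pvUpdU, h]

lemma pvSelUpd_some_none (cs : List Char) (p : String × Int) (r : Nat)
    (h : pvRc p.1 p.2 cs = some r) :
    pvSelUpd cs none p = if r < cs.length then some (r, p.1) else none := by
  simp only [pvSelUpd, h]

lemma pvSelUpd_some_some (cs : List Char) (p : String × Int) (r br : Nat) (s : String)
    (h : pvRc p.1 p.2 cs = some r) :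
    pvSelUpd cs (some (br, s)) p =
      if r < cs.length then (if r < br then some (r, p.1) else some (br, s))
      else some (br, s) := by
  simp only [pvSelUpd, h]

-- ===== duplicates are no-ops for B's argmin fold =====

def pvInv (cs : List Char) (seen : List String) (b : Option (Nat × String)) : Prop :=
  ∀ k ∈ seen, ∀ e, pvRc k 0 cs = some e → ∃ be s, b = some (be, s) ∧ be ≤ e

lemma pvUpdU_skip (cs : List Char) (b : Option (Nat × String)) (k : String)
    (h : ∀ e, pvRc k 0 cs = some e → ∃ be s, b = some (be, s) ∧ be ≤ e) :
    pvUpdU cs b k = b := by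
  cases hr : pvRc k 0 cs with
  | none => exact pvUpdU_none _ _ _ hr
  | some e =>
    obtain ⟨be, s, hb, hle⟩ := h e hr
    subst hb
    rw [pvUpdU_some_some cs k e be s hr, if_neg (by omega)]

lemma pvInv_step (cs : List Char) (seen : List String) (b : Option (Nat × String))
    (k : String) (h : pvInv cs seen b) : pvInv cs (seen ++ [k]) (pvUpdU cs b k) := by
  intro k' hk' e' he'
  cases hr : pvRc k 0 cs with
  | none =>
    rw [pvUpdU_none _ _ _ hr]
    rcases List.mem_append.mp hk' with hk' | hk'
    · exact h k' hk' e' he'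
    · have : k' = k := by simpa using hk'
      subst this
      rw [hr] at he'
      exact absurd he' (by simp)
  | some e =>
    rcases List.mem_append.mp hk' with hk' | hk'
    · obtain ⟨be, s, hb, hle⟩ := h k' hk' e' he'
      subst hb
      rw [pvUpdU_some_some cs k e be s hr]
      by_cases hlt : e < be
      · rw [if_pos hlt]; exact ⟨e, k, rfl, by omega⟩
      · rw [if_neg hlt]; exact ⟨be, s, rfl, hle⟩
    · have : k' = k := by simpa using hk'
      subst this
      rw [hr] at he'
      have hee : e = e' := by injection he'
      subst hee
      cases b with
      | none => rw [pvUpdU_some_none cs k' e hr]; exact ⟨e, k', rfl, le_refl _⟩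
      | some p =>
        obtain ⟨be, s⟩ := p
        rw [pvUpdU_some_some cs k' e be s hr]
        by_cases hlt : e < be
        · rw [if_pos hlt]; exact ⟨e, k', rfl, le_refl _⟩
        · rw [if_neg hlt]; exact ⟨be, s, rfl, by omega⟩

lemma pvFoldU_dedup (cs : List Char) :
    ∀ (l seen : List String) (b : Option (Nat × String)), pvInv cs seen b →
      List.foldl (pvUpdU cs) b l = List.foldl (pvUpdU cs) b (pvDdAfter seen l) := by
  intro l
  induction l with
  | nil => intro seen b _; rfl
  | cons k t ih =>
    intro seen b h
    rw [pvDdAfter]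
    by_cases hk : k ∈ seen
    · rw [if_pos hk, List.foldl_cons, pvUpdU_skip cs b k (h k hk), ih seen b h]
    · rw [if_neg hk, List.foldl_cons, List.foldl_cons]
      exact ih (seen ++ [k]) _ (pvInv_step cs seen b k h)

-- ===== relation between A's filtered argmin and B's unfiltered argmin =====

def pvRel (cs : List Char) (bF bU : Option (Nat × String)) : Prop :=
  (bU = bF ∨ (bF = none ∧ ∃ s, bU = some (cs.length, s))) ∧
  (∀ e s, bU = some (e, s) → e ≤ cs.length)

lemma pvRel_step (cs : List Char) (bF bU : Option (Nat × String)) (k : String)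
    (h : pvRel cs bF bU) : pvRel cs (pvSelUpd cs bF (k, 0)) (pvUpdU cs bU k) := by
  obtain ⟨hd, hb⟩ := h
  cases hr : pvRc k 0 cs with
  | none => rw [pvSelUpd_none cs bF (k, 0) hr, pvUpdU_none cs bU k hr]; exact ⟨hd, hb⟩
  | some e =>
    have he : e ≤ cs.length := pvRc_le k cs 0 e hr
    by_cases hlt : e < cs.length
    · rcases hd with hd | ⟨hF, s, hU⟩
      · subst hd
        cases bU with
        | none =>
          rw [pvSelUpd_some_none cs (k, 0) e hr, if_pos hlt, pvUpdU_some_none cs k e hr]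
          refine ⟨Or.inl rfl, ?_⟩
          intro e' s' h'
          injection h' with h'
          rw [Prod.mk.injEq] at h'
          omega
        | some p =>
          obtain ⟨bf, sf⟩ := p
          rw [pvSelUpd_some_some cs (k, 0) e bf sf hr, if_pos hlt,
            pvUpdU_some_some cs k e bf sf hr]
          by_cases hib : e < bf
          · rw [if_pos hib]
            refine ⟨Or.inl rfl, ?_⟩
            intro e' s' h'
            injection h' with h'
            rw [Prod.mk.injEq] at h'
            omega
          · rw [if_neg hib]
            exact ⟨Or.inl rfl, hb⟩
      · subst hF; subst hU
        rw [pvSelUpd_some_none cs (k, 0) e hr, if_pos hlt,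
          pvUpdU_some_some cs k e cs.length s hr, if_pos hlt]
        refine ⟨Or.inl rfl, ?_⟩
        intro e' s' h'
        injection h' with h'
        rw [Prod.mk.injEq] at h'
        omega
    · have hen : e = cs.length := by omega
      rcases hd with hd | ⟨hF, s, hU⟩
      · subst hd
        cases bU with
        | none =>
          rw [pvSelUpd_some_none cs (k, 0) e hr, if_neg hlt, pvUpdU_some_none cs k e hr]
          refine ⟨Or.inr ⟨rfl, k, by rw [hen]⟩, ?_⟩
          intro e' s' h'
          injection h' with h'
          rw [Prod.mk.injEq] at h'
          omega
        | some p =>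
          obtain ⟨bu, su⟩ := p
          have hbu : bu ≤ cs.length := hb bu su rfl
          rw [pvSelUpd_some_some cs (k, 0) e bu su hr, if_neg hlt,
            pvUpdU_some_some cs k e bu su hr, if_neg (by omega : ¬ e < bu)]
          exact ⟨Or.inl rfl, hb⟩
      · subst hF; subst hU
        rw [pvSelUpd_some_none cs (k, 0) e hr, if_neg hlt,
          pvUpdU_some_some cs k e cs.length s hr, if_neg hlt]
        exact ⟨Or.inr ⟨rfl, s, rfl⟩, hb⟩

lemma pvRel_fold (cs : List Char) :
    ∀ (l : List String) (bF bU : Option (Nat × String)), pvRel cs bF bU →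
      pvRel cs (List.foldl (fun b k => pvSelUpd cs b (k, 0)) bF l)
        (List.foldl (pvUpdU cs) bU l) := by
  intro l
  induction l with
  | nil => intro bF bU h; exact h
  | cons k t ih =>
    intro bF bU h
    rw [List.foldl_cons, List.foldl_cons]
    exact ih _ _ (pvRel_step cs bF bU k h)

-- ===== once-some-stays-some and membership lemmas for both folds =====

lemma pvSelUpd_isSome (cs : List Char) (b : Option (Nat × String)) (p : String × Int)
    (h : b.isSome) : (pvSelUpd cs b p).isSome := by
  obtain ⟨q, hq⟩ := Option.isSome_iff_exists.mp h
  subst hq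
  obtain ⟨br, s⟩ := q
  cases hr : pvRc p.1 p.2 cs with
  | none => rw [pvSelUpd_none _ _ _ hr]; simp
  | some r =>
    rw [pvSelUpd_some_some cs p r br s hr]
    by_cases hlt : r < cs.length
    · rw [if_pos hlt]
      by_cases hrb : r < br
      · rw [if_pos hrb]; simp
      · rw [if_neg hrb]; simp
    · rw [if_neg hlt]; simp

lemma pvFoldF_isSome (cs : List Char) :
    ∀ (l : List String) (b : Option (Nat × String)), b.isSome →
      (List.foldl (fun b k => pvSelUpd cs b (k, 0)) b l).isSome := by
  intro l
  induction l with
  | nil => intro b h; exact h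
  | cons k t ih => intro b h; exact ih _ (pvSelUpd_isSome cs b (k, 0) h)

lemma pvFoldF_some_of_mem (cs : List Char) :
    ∀ (l : List String) (b : Option (Nat × String)) (k : String) (e : Nat),
      k ∈ l → pvRc k 0 cs = some e → e < cs.length →
      (List.foldl (fun b k => pvSelUpd cs b (k, 0)) b l).isSome := by
  intro l
  induction l with
  | nil => intro b k e hk; exact absurd hk (by simp)
  | cons a t ih =>
    intro b k e hk hr hlt
    rw [List.foldl_cons]
    rcases List.mem_cons.mp hk with hk | hk
    · subst hk
      apply pvFoldF_isSome
      cases b with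
      | none => rw [pvSelUpd_some_none cs (k, 0) e hr, if_pos hlt]; simp
      | some q =>
        obtain ⟨br, s⟩ := q
        rw [pvSelUpd_some_some cs (k, 0) e br s hr, if_pos hlt]
        by_cases hrb : e < br
        · rw [if_pos hrb]; simp
        · rw [if_neg hrb]; simp
    · exact ih _ k e hk hr hlt

lemma pvFoldF_none (cs : List Char) :
    ∀ (l : List String), (∀ k ∈ l, ∀ e, pvRc k 0 cs = some e → ¬ e < cs.length) →
      List.foldl (fun b k => pvSelUpd cs b (k, 0)) none l = none := by
  intro l
  induction l with
  | nil => intro _; rfl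
  | cons k t ih =>
    intro h
    rw [List.foldl_cons]
    have hupd : pvSelUpd cs none (k, 0) = none := by
      cases hr : pvRc k 0 cs with
      | none => exact pvSelUpd_none _ _ _ hr
      | some e =>
        rw [pvSelUpd_some_none cs (k, 0) e hr, if_neg (h k List.mem_cons_self e hr)]
    rw [hupd]
    exact ih (fun k' hk' => h k' (List.mem_cons_of_mem k hk'))

lemma pvUpdU_isSome (cs : List Char) (b : Option (Nat × String)) (k : String)
    (h : b.isSome) : (pvUpdU cs b k).isSome := by
  obtain ⟨q, hq⟩ := Option.isSome_iff_exists.mp h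
  subst hq
  obtain ⟨be, s⟩ := q
  cases hr : pvRc k 0 cs with
  | none => rw [pvUpdU_none _ _ _ hr]; simp
  | some e =>
    rw [pvUpdU_some_some cs k e be s hr]
    by_cases hlt : e < be
    · rw [if_pos hlt]; simp
    · rw [if_neg hlt]; simp

lemma pvFoldU_isSome (cs : List Char) :
    ∀ (l : List String) (b : Option (Nat × String)), b.isSome →
      (List.foldl (pvUpdU cs) b l).isSome := by
  intro l
  induction l with
  | nil => intro b h; exact h
  | cons k t ih => intro b h; exact ih _ (pvUpdU_isSome cs b k h)

lemma pvFoldU_some_of_mem (cs : List Char) :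
    ∀ (l : List String) (b : Option (Nat × String)) (k : String) (e : Nat),
      k ∈ l → pvRc k 0 cs = some e → (List.foldl (pvUpdU cs) b l).isSome := by
  intro l
  induction l with
  | nil => intro b k e hk; exact absurd hk (by simp)
  | cons a t ih =>
    intro b k e hk hr
    rw [List.foldl_cons]
    rcases List.mem_cons.mp hk with hk | hk
    · subst hk
      apply pvFoldU_isSome
      cases b with
      | none => rw [pvUpdU_some_none cs k e hr]; simp
      | some q =>
        obtain ⟨be, s⟩ := q
        rw [pvUpdU_some_some cs k e be s hr]
        by_cases hlt : e < be
        · rw [if_pos hlt]; simp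
        · rw [if_neg hlt]; simp
    · exact ih _ k e hk hr

lemma pvFoldU_value (cs : List Char) :
    ∀ (l : List String) (b : Option (Nat × String)) (e : Nat) (s : String),
      List.foldl (pvUpdU cs) b l = some (e, s) →
      b = some (e, s) ∨ ∃ k ∈ l, pvRc k 0 cs = some e ∧ s = k := by
  intro l
  induction l with
  | nil => intro b e s h; exact Or.inl h
  | cons a t ih =>
    intro b e s h
    rw [List.foldl_cons] at h
    rcases ih _ e s h with h' | ⟨k, hk, hrk, hs⟩
    · cases hr : pvRc a 0 cs with
      | none => rw [pvUpdU_none _ _ _ hr] at h'; exact Or.inl h'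
      | some e' =>
        cases b with
        | none =>
          rw [pvUpdU_some_none cs a e' hr] at h'
          injection h' with h'
          rw [Prod.mk.injEq] at h'
          exact Or.inr ⟨a, List.mem_cons_self, by rw [← h'.1]; exact hr, h'.2.symm⟩
        | some q =>
          obtain ⟨be, bs⟩ := q
          rw [pvUpdU_some_some cs a e' be bs hr] at h'
          by_cases hib : e' < be
          · rw [if_pos hib] at h'
            injection h' with h'
            rw [Prod.mk.injEq] at h'
            exact Or.inr ⟨a, List.mem_cons_self, by rw [← h'.1]; exact hr, h'.2.symm⟩
          · rw [if_neg hib] at h'; exact Or.inl h'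
    · exact Or.inr ⟨k, List.mem_cons_of_mem a hk, hrk, hs⟩

-- ===== bridge between pvRc and the sticky scan state pvStepD used by D_ =====

lemma pvRc_done (k : String) : ∀ (cs : List Char) (v : Int) (e : Nat),
    pvRc k v cs = some e → (cs.take e).foldl (pvStepD k) v = PySem.Str.len k := by
  intro cs
  induction cs with
  | nil =>
    intro v e h
    simp only [pvRc] at h
    by_cases hv : v = PySem.Str.len k
    · simpa using hv
    · rw [if_neg hv] at h; exact absurd h (by simp)
  | cons ch t ih =>
    intro v e h
    simp only [pvRc] at h
    by_cases hv : v = PySem.Str.len k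
    · rw [if_pos hv] at h
      injection h with h
      subst h
      simpa using hv
    · rw [if_neg hv] at h
      cases hr : pvRc k (if PySem.Str.pyGet? k v = some ch then v + 1 else 0) t with
      | none => rw [hr] at h; exact absurd h (by simp)
      | some e' =>
        rw [hr] at h
        simp only [Option.map_some, Option.some.injEq] at h
        subst h
        rw [List.take_succ_cons, List.foldl_cons,
          show pvStepD k v ch = (if PySem.Str.pyGet? k v = some ch then v + 1 else 0) by
            simp only [pvStepD]; rw [if_neg hv]]
        exact ih _ _ hr

lemma pvDone_rc (k : String) : ∀ (cs : List Char) (v : Int),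
    cs.foldl (pvStepD k) v = PySem.Str.len k → ∃ e, pvRc k v cs = some e := by
  intro cs
  induction cs with
  | nil =>
    intro v h
    simp only [List.foldl_nil] at h
    exact ⟨0, by rw [pvRc, if_pos h]⟩
  | cons ch t ih =>
    intro v h
    by_cases hv : v = PySem.Str.len k
    · exact ⟨0, pvRc_self k v (ch :: t) hv⟩
    · rw [List.foldl_cons,
        show pvStepD k v ch = (if PySem.Str.pyGet? k v = some ch then v + 1 else 0) by
          simp only [pvStepD]; rw [if_neg hv]] at h
      obtain ⟨e, he⟩ := ih _ h
      refine ⟨e + 1, ?_⟩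
      simp only [pvRc]
      rw [if_neg hv, he]
      rfl

lemma pvRc_extend (k : String) : ∀ (l l' : List Char) (v : Int) (e : Nat),
    pvRc k v l = some e → pvRc k v (l ++ l') = some e := by
  intro l
  induction l with
  | nil =>
    intro l' v e h
    simp only [pvRc] at h
    by_cases hv : v = PySem.Str.len k
    · rw [if_pos hv] at h
      injection h with h
      subst h
      exact pvRc_self k v l' hv
    · rw [if_neg hv] at h; exact absurd h (by simp)
  | cons ch t ih =>
    intro l' v e h
    simp only [pvRc] at h
    by_cases hv : v = PySem.Str.len k
    · rw [if_pos hv] at h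
      injection h with h
      subst h
      exact pvRc_self k v (ch :: t ++ l') hv
    · rw [if_neg hv] at h
      cases hr : pvRc k (if PySem.Str.pyGet? k v = some ch then v + 1 else 0) t with
      | none => rw [hr] at h; exact absurd h (by simp)
      | some e' =>
        rw [hr] at h
        simp only [Option.map_some, Option.some.injEq] at h
        subst h
        rw [List.cons_append]
        simp only [pvRc]
        rw [if_neg hv, ih l' _ e' hr]
        rfl

/-- a completion of the scan over a prefix of length `j` yields pvRc ≤ j on the full list -/
lemma pvDone_take_rc (k : String) (cs : List Char) (j : Nat) (hj : j < cs.length)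
    (h : (cs.take j).foldl (pvStepD k) 0 = PySem.Str.len k) :
    ∃ e ≤ j, pvRc k 0 cs = some e := by
  obtain ⟨e, he⟩ := pvDone_rc k (cs.take j) 0 h
  have hle : e ≤ j := by
    have := pvRc_le k (cs.take j) 0 e he
    simp only [List.length_take] at this
    omega
  exact ⟨e, hle, by
    have := pvRc_extend k (cs.take j) (cs.drop j) 0 e he
    rwa [List.take_append_drop] at this⟩

lemma pvRc_restrict (k : String) : ∀ (l : List Char) (v : Int) (e j : Nat),
    pvRc k v l = some e → e ≤ j → pvRc k v (l.take j) = some e := by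
  intro l
  induction l with
  | nil => intro v e j h _; simpa using h
  | cons ch t ih =>
    intro v e j h hj
    simp only [pvRc] at h
    by_cases hv : v = PySem.Str.len k
    · rw [if_pos hv] at h
      injection h with h
      subst h
      exact pvRc_self k v _ hv
    · rw [if_neg hv] at h
      cases hr : pvRc k (if PySem.Str.pyGet? k v = some ch then v + 1 else 0) t with
      | none => rw [hr] at h; exact absurd h (by simp)
      | some e' =>
        rw [hr] at h
        simp only [Option.map_some, Option.some.injEq] at h
        subst h
        cases j with
        | zero => omega
        | succ j' =>
          rw [List.take_succ_cons]
          simp only [pvRc]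
          rw [if_neg hv, ih _ e' j' hr (by omega)]
          rfl

lemma pvUpdB_eq_updU (cs : List Char) : pvUpdB cs = pvUpdU cs := by
  funext best key
  cases best with
  | none =>
    show (match pvMatchEnd key cs with
      | none => (none : Option (Nat × String))
      | some e => some (e, key)) = pvUpdU cs none key
    rw [pvMatchEnd_eq]
    cases hr : pvRc key 0 cs with
    | none => rw [pvUpdU_none cs none key hr]
    | some e => rw [pvUpdU_some_none cs key e hr]
  | some p =>
    obtain ⟨be, s⟩ := p
    show (match pvMatchEnd key (cs.take be) with
      | none => some (be, s)
      | some e => if e < be then some (e, key) else some (be, s)) =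
        pvUpdU cs (some (be, s)) key
    rw [pvMatchEnd_eq]
    cases hr : pvRc key 0 cs with
    | none =>
      rw [pvUpdU_none cs _ key hr]
      have hpre : pvRc key 0 (cs.take be) = none := by
        cases hp : pvRc key 0 (cs.take be) with
        | none => rfl
        | some e =>
          have := pvRc_extend key (cs.take be) (cs.drop be) 0 e hp
          rw [List.take_append_drop] at this
          rw [this] at hr
          exact absurd hr (by simp)
      rw [hpre]
    | some e =>
      rw [pvUpdU_some_some cs key e be s hr]
      by_cases hlt : e < be
      · rw [pvRc_restrict key cs 0 e be hr (by omega)]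
      · cases hp : pvRc key 0 (cs.take be) with
        | none => simp [hlt]
        | some e' =>
          have hext := pvRc_extend key (cs.take be) (cs.drop be) 0 e' hp
          rw [List.take_append_drop, hr] at hext
          have hee : e = e' := by injection hext
          subst hee
          rfl

-- ===== the common normal form of both ports =====

lemma pvA_eq (line : String) (keywords : List String) :
    parse_for_keywords line keywords =
      (List.foldl (fun b k => pvSelUpd line.toList b (k, 0)) none
        (pvDdAfter [] keywords)).map (·.2) := by
  unfold parse_for_keywords
  have hitems := pvItems_init keywords PySem.Dict.empty [] rfl
  rw [List.nil_append] at hitems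
  rw [hitems, pvLoopA_eq_sel]
  unfold pvSel
  rw [List.foldl_map]

lemma pvB_eq (line : String) (keywords : List String) :
    parse_for_keywords_alt line keywords =
      (List.foldl (pvUpdU line.toList) none (pvDdAfter [] keywords)).map (·.2) := by
  unfold parse_for_keywords_alt
  rw [pvUpdB_eq_updU,
    pvFoldU_dedup line.toList keywords [] none (by intro k hk; exact absurd hk (by simp))]

-- ===== VERDICT (by name: the statements are the Claim_ definitions above) =====

theorem parse_for_keywords_spec : Claim_unchanged_parse_for_keywords := by
  intro line keywords _ hnD
  rw [pvA_eq, pvB_eq]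
  have hrel := pvRel_fold line.toList (pvDdAfter [] keywords) none none
    ⟨Or.inl rfl, by intro e s h; exact absurd h (by simp)⟩
  rcases hrel.1 with heq | ⟨hF, s, hU⟩
  · rw [heq]
  · exfalso
    apply hnD
    constructor
    · rcases pvFoldU_value line.toList (pvDdAfter [] keywords) none line.toList.length s hU with
        h | ⟨k, hk, hrk, _⟩
      · exact absurd h (by simp)
      · refine ⟨k, pvMem_ddAfter keywords [] k hk, ?_⟩
        have := pvRc_done k line.toList 0 line.toList.length hrk
        rw [List.take_length] at this
        simp [pvDoneD, this]
    · intro k hk j hj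
      by_contra hdone
      rw [Bool.not_eq_false, pvDoneD, beq_iff_eq] at hdone
      obtain ⟨e, hle, he⟩ := pvDone_take_rc k line.toList j hj hdone
      have hsome := pvFoldF_some_of_mem line.toList (pvDdAfter [] keywords) none k e
        (by
          have hmem : k ∈ PySem.List.dedup keywords := by
            rw [PySem.List.mem_dedup]; exact hk
          -- pvDdAfter [] l = dedup l
          rwa [← pvDd_eq_dedup] at hmem)
        he (by omega)
      rw [hF] at hsome
      exact absurd hsome (by simp)

theorem parse_for_keywords_changed : Claim_changed_parse_for_keywords := by
  unfold Claim_changed_parse_for_keywords; decide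

theorem parse_for_keywords_tight : Claim_exact_parse_for_keywords := by
  intro line keywords _ hD
  obtain ⟨⟨k0, hk0, hdone0⟩, h2⟩ := hD
  rw [pvA_eq, pvB_eq]
  have hFnone : List.foldl (fun b k => pvSelUpd line.toList b (k, 0)) none
      (pvDdAfter [] keywords) = none := by
    apply pvFoldF_none
    intro k hk e he hlt
    have hmem : k ∈ keywords := pvMem_ddAfter keywords [] k hk
    have hdone : (line.toList.take e).foldl (pvStepD k) 0 = PySem.Str.len k :=
      pvRc_done k line.toList 0 e he
    have hfalse := h2 k hmem e hlt
    simp only [pvDoneD] at hfalse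
    simp [hdone] at hfalse
  have hdone0' : line.toList.foldl (pvStepD k0) 0 = PySem.Str.len k0 := by
    simpa only [pvDoneD, beq_iff_eq] using hdone0
  obtain ⟨e0, he0⟩ := pvDone_rc k0 line.toList 0 hdone0'
  have hmem0 : k0 ∈ pvDdAfter [] keywords := by
    rw [pvDd_eq_dedup, PySem.List.mem_dedup]; exact hk0
  have hUsome := pvFoldU_some_of_mem line.toList (pvDdAfter [] keywords) none k0 e0 hmem0 he0
  obtain ⟨u, hu⟩ := Option.isSome_iff_exists.mp hUsome
  rw [hFnone, hu]
  simp
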